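-- pv_equiv track=rewrite | github.com/rhythmcao/text-to-sql-astormer | nsts/parse_sql_to_json.py | exist_table_alias_contradiction
-- ===== SOURCE A (Python) =====
-- def exist_table_alias_contradiction(toks):
--     as_idxs = [idx for idx, tok in enumerate(toks) if tok == 'as']
--     alias = {}
--     for idx in as_idxs:
--         a = toks[idx+1]
--         if a in alias and alias[a] != toks[idx-1]:
--             return True
--         alias[a] = toks[idx-1]
--     return False
-- ===== SOURCE B (Python) =====
-- def exist_table_alias_contradiction(toks):
--     for j, tok in enumerate(toks):
--         if tok != 'as':
--             continue
--         for i in range(j):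
--             if toks[i] == 'as' and toks[i + 1] == toks[j + 1]:
--                 if toks[i - 1] != toks[j - 1]:
--                     return True
--                 break
--     return False
-- ===== Notes on version B (the rewrite author's own statement) =====
-- stated objective: alternative
-- what changed: B drops A's alias->table dict and precomputed index list entirely: a nested quadratic scan compares each 'as' occurrence with the FIRST earlier 'as' occurrence of the same alias (break after it), correct because a contradiction under A's keep-last dict first fires exactly where the first occurrence's table differs.
-- outside the precondition, e.g. on exist_table_alias_contradiction(['t1', 'as', 'a', 't2', 'as', 'a', 'as']): A returns True, B returns True
import Mathlib
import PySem

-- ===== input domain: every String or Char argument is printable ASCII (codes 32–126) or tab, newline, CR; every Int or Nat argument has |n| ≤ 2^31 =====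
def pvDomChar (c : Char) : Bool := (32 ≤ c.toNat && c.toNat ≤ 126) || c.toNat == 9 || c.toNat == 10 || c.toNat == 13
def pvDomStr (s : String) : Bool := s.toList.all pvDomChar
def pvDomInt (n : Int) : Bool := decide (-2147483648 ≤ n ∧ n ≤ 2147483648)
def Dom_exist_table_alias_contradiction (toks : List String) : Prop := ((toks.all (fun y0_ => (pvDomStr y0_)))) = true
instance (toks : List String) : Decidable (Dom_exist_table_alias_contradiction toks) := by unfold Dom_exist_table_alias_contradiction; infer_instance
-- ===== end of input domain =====

-- B replaces A's dict-driven single pass by a dict-free nested quadratic scan: each 'as'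
-- occurrence is compared with the FIRST earlier 'as' occurrence of the same alias ('alternative').

-- ===== PORT A =====
-- A's loop over as_idxs with early return True; the IndexError branch (pyGet? = none,
-- excluded by Pre_) returns false.
def pvALoop (toks : List String) (aliasD : PySem.Dict String String) :
    List Int → Bool
  | [] => false
  | idx :: rest =>
    match PySem.List.pyGet? toks (idx + 1), PySem.List.pyGet? toks (idx - 1) with
    | some a, some prev =>
      match aliasD.get? a with
      | some t => if t ≠ prev then true else pvALoop toks (aliasD.insert a prev) rest
      | none => pvALoop toks (aliasD.insert a prev) rest
    | _, _ => false   -- IndexError in Python; outside Pre_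

def exist_table_alias_contradiction (toks : List String) : Bool :=
  let as_idxs : List Int :=
    ((PySem.List.enumerate toks).filter (fun p => p.2 == "as")).map (fun p => p.1)
  pvALoop toks PySem.Dict.empty as_idxs

-- ===== PORT B =====
-- inner 'for i in range(j)': some true = 'return True', some false = 'break', none = fell through.
-- Indexing uses pyGetD with default "": inside Pre_ every index read here is in range
-- (out-of-range reads are Python IndexErrors, outside Pre_).
def pvBInner (toks : List String) (j : Int) : List Int → Option Bool
  | [] => none
  | i :: rest =>
    if (PySem.List.pyGetD toks i "" == "as") &&
       (PySem.List.pyGetD toks (i + 1) "" == PySem.List.pyGetD toks (j + 1) "") then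
      if PySem.List.pyGetD toks (i - 1) "" ≠ PySem.List.pyGetD toks (j - 1) "" then some true
      else some false
    else pvBInner toks j rest

-- outer 'for j, tok in enumerate(toks)'
def pvBOuter (toks : List String) : List (Int × String) → Bool
  | [] => false
  | (j, tok) :: rest =>
    if tok ≠ "as" then pvBOuter toks rest
    else
      match pvBInner toks j (PySem.List.pyRange 0 j 1) with
      | some true => true
      | _ => pvBOuter toks rest

def exist_table_alias_contradiction_alt (toks : List String) : Bool :=
  pvBOuter toks (PySem.List.enumerate toks)

-- ===== PRECONDITION & SPEC =====
-- Pre_ excludes token lists ending in 'as': there Python A raises IndexError reading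
-- toks[idx+1] unless an earlier contradiction already returned True — and on those
-- returning inputs A and B agree anyway (both True; see claim cites).
def Pre_exist_table_alias_contradiction (toks : List String) : Prop :=
  toks.getLast? ≠ some "as"
instance (toks : List String) : Decidable (Pre_exist_table_alias_contradiction toks) := by
  unfold Pre_exist_table_alias_contradiction; infer_instance
def pvWitness_exist_table_alias_contradiction : List String :=
  ["t1", "as", "a", "t2", "as", "a"]

def Spec_exist_table_alias_contradiction (toks : List String) (out : Bool) : Prop :=
  out = exist_table_alias_contradiction_alt toks
instance (toks : List String) (out : Bool) : Decidable (Spec_exist_table_alias_contradiction toks out) := by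
  unfold Spec_exist_table_alias_contradiction; infer_instance

-- ===== CLAIM (what is proved, stated in full; the proofs are below) =====
def Claim_equal_exist_table_alias_contradiction : Prop :=
  ∀ (toks : List String), Dom_exist_table_alias_contradiction toks →
    Pre_exist_table_alias_contradiction toks →
    Spec_exist_table_alias_contradiction toks (exist_table_alias_contradiction toks)

-- ===== LEMMAS AND PROOFS =====

-- proof-only abbreviations: the token at i, the token after i, the token before i
def pvTk (toks : List String) (i : Int) : String := PySem.List.pyGetD toks i ""
def pvNx (toks : List String) (i : Int) : String := PySem.List.pyGetD toks (i + 1) ""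
def pvTb (toks : List String) (i : Int) : String := PySem.List.pyGetD toks (i - 1) ""

-- first earlier 'as' position (below m) carrying alias a
def pvFirstAs (toks : List String) (m : Nat) (a : String) : Option Nat :=
  (List.range m).find? (fun (i : Nat) => pvTk toks i == "as" && pvNx toks i == a)

theorem pv_tk_lt (toks : List String) (m : Nat) (h : pvTk toks m = "as") :
    m < toks.length := by
  by_contra hm
  rw [pvTk, PySem.List.pyGetD_natCast, List.getD_eq_getElem?_getD,
    List.getElem?_eq_none (by omega)] at h
  simp at h

theorem pv_valid_as (toks : List String)
    (hpre : Pre_exist_table_alias_contradiction toks) (m : Nat)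
    (h : pvTk toks m = "as") :
    PySem.List.pyGet? toks ((m : Int) + 1) = some (pvNx toks m) ∧
    PySem.List.pyGet? toks ((m : Int) - 1) = some (pvTb toks m) := by
  have hm : m < toks.length := pv_tk_lt toks m h
  have hm1 : m + 1 < toks.length := by
    rcases Nat.lt_or_ge (m + 1) toks.length with h1 | h1
    · exact h1
    · exfalso
      apply hpre
      have hmeq : m = toks.length - 1 := by omega
      rw [List.getLast?_eq_getElem?, ← hmeq, List.getElem?_eq_getElem hm]
      rw [pvTk, PySem.List.pyGetD_natCast, List.getD_eq_getElem?_getD,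
        List.getElem?_eq_getElem hm] at h
      exact congrArg some h
  constructor
  · have hc : ((m : Int) + 1) = ((m + 1 : Nat) : Int) := by push_cast; ring
    rw [hc, PySem.List.pyGet?_natCast, List.getElem?_eq_getElem hm1, pvNx, hc,
      PySem.List.pyGetD_natCast, List.getD_eq_getElem?_getD, List.getElem?_eq_getElem hm1]
    rfl
  · cases m with
    | zero =>
      have hne : toks ≠ [] := List.ne_nil_of_length_pos (by omega)
      have hz : ((0 : Nat) : Int) - 1 = -1 := by norm_num
      rw [hz, PySem.List.pyGet?_neg_one, pvTb, hz, PySem.List.pyGetD_neg_one toks "" hne,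
        List.getLast?_eq_getLast_of_ne_nil hne]
    | succ mm =>
      have hc : ((mm + 1 : Nat) : Int) - 1 = ((mm : Nat) : Int) := by push_cast; ring
      rw [hc, PySem.List.pyGet?_natCast, List.getElem?_eq_getElem (by omega : mm < toks.length),
        pvTb, hc, PySem.List.pyGetD_natCast, List.getD_eq_getElem?_getD,
        List.getElem?_eq_getElem (by omega : mm < toks.length)]
      rfl

theorem pv_range_cast (j : Nat) :
    PySem.List.pyRange 0 (j : Int) 1 = (List.range j).map (fun (n : Nat) => (n : Int)) := by
  rw [PySem.List.pyRange_one 0 (j : Int)]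
  simp

theorem pv_inner_on_list (toks : List String) (j : Nat) (is : List Nat) :
    pvBInner toks (j : Int) (is.map (fun (n : Nat) => (n : Int))) =
      match is.find? (fun (i : Nat) => pvTk toks i == "as" && pvNx toks i == pvNx toks j) with
      | none => none
      | some i => if pvTb toks i ≠ pvTb toks j then some true else some false := by
  induction is with
  | nil => rfl
  | cons i rest ih =>
    cases hc : (pvTk toks i == "as" && pvNx toks i == pvNx toks j) with
    | true =>
      simp only [pvTk, pvNx] at hc
      simp only [List.map_cons, pvBInner, List.find?_cons, hc, pvTk, pvNx]
      rfl
    | false =>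
      simp only [pvTk, pvNx] at hc
      simp only [List.map_cons, pvBInner, List.find?_cons, hc, pvTk, pvNx] at ih ⊢
      exact ih

theorem pv_inner_char (toks : List String) (j : Nat) :
    pvBInner toks (j : Int) (PySem.List.pyRange 0 (j : Int) 1) =
      match pvFirstAs toks j (pvNx toks j) with
      | none => none
      | some i => if pvTb toks i ≠ pvTb toks j then some true else some false := by
  rw [pv_range_cast]
  exact pv_inner_on_list toks j (List.range j)

theorem pv_firstAs_succ (toks : List String) (m : Nat) (a : String) :
    pvFirstAs toks (m + 1) a =
      (pvFirstAs toks m a).or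
        (if pvTk toks m == "as" && pvNx toks m == a then some m else none) := by
  unfold pvFirstAs
  rw [List.range_succ, List.find?_append]
  cases hf : (List.range m).find? (fun (i : Nat) => pvTk toks i == "as" && pvNx toks i == a) with
  | some i => rfl
  | none =>
    simp only [Option.none_or]
    simp only [List.find?_cons, List.find?_nil]
    cases h : (pvTk toks m == "as" && pvNx toks m == a) <;> rfl

theorem pvALoop_cons_some (toks : List String) (d : PySem.Dict String String)
    (idx : Int) (rest : List Int) (a prev : String)
    (h1 : PySem.List.pyGet? toks (idx + 1) = some a)
    (h2 : PySem.List.pyGet? toks (idx - 1) = some prev) :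
    pvALoop toks d (idx :: rest) =
      match d.get? a with
      | some t => if t ≠ prev then true else pvALoop toks (d.insert a prev) rest
      | none => pvALoop toks (d.insert a prev) rest := by
  rw [pvALoop, h1, h2]

theorem pv_main (toks : List String)
    (hpre : Pre_exist_table_alias_contradiction toks) :
    ∀ (k m : Nat) (d : PySem.Dict String String),
      (∀ a, d.get? a = (pvFirstAs toks m a).map (fun (i : Nat) => pvTb toks i)) →
      pvALoop toks d
        (((List.range' m k).filter (fun (i : Nat) => pvTk toks i == "as")).map (fun (n : Nat) => (n : Int))) =
      pvBOuter toks ((List.range' m k).map (fun (n : Nat) => ((n : Int), pvTk toks n))) := by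
  intro k
  induction k with
  | zero => intro m d _; rfl
  | succ k ih =>
    intro m d hinv
    rw [List.range'_succ]
    by_cases htk : pvTk toks m = "as"
    · rw [List.filter_cons_of_pos (by simpa using htk), List.map_cons, List.map_cons]
      obtain ⟨h1, h2⟩ := pv_valid_as toks hpre m htk
      rw [pvALoop_cons_some toks d _ _ _ _ h1 h2, hinv (pvNx toks m), pvBOuter,
        if_neg (by simp [htk]), pv_inner_char]
      cases hfa : pvFirstAs toks m (pvNx toks m) with
      | none =>
        simp only [Option.map_none]
        refine ih (m + 1) _ (fun a => ?_)
        rw [pv_firstAs_succ]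
        by_cases ha : pvNx toks m = a
        · subst ha
          rw [PySem.Dict.get?_insert_self, hfa]
          simp [htk]
        · rw [PySem.Dict.get?_insert_of_ne _ _ (fun h => ha h.symm), hinv a]
          have hcond : (pvTk toks m == "as" && pvNx toks m == a) = false := by
            simp [ha]
          rw [hcond]
          simp
      | some i0 =>
        simp only [Option.map_some]
        by_cases hne : pvTb toks i0 ≠ pvTb toks m
        · rw [if_pos hne, if_pos hne]
        · rw [if_neg hne, if_neg hne]
          rw [not_not] at hne
          refine ih (m + 1) _ (fun a => ?_)
          rw [pv_firstAs_succ]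
          by_cases ha : pvNx toks m = a
          · subst ha
            rw [PySem.Dict.get?_insert_self, hfa]
            simp [hne]
          · rw [PySem.Dict.get?_insert_of_ne _ _ (fun h => ha h.symm), hinv a]
            have hcond : (pvTk toks m == "as" && pvNx toks m == a) = false := by
              simp [ha]
            rw [hcond]
            simp
    · rw [List.filter_cons_of_neg (by simpa using htk), List.map_cons, pvBOuter,
        if_pos (by simp [htk])]
      refine ih (m + 1) d (fun a => ?_)
      rw [pv_firstAs_succ]
      have hcond : (pvTk toks m == "as" && pvNx toks m == a) = false := by
        simp [htk]
      rw [hcond, hinv a]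
      simp

theorem pv_enum_eq (toks : List String) :
    PySem.List.enumerate toks =
      (List.range' 0 toks.length).map (fun (n : Nat) => ((n : Int), pvTk toks n)) := by
  rw [PySem.List.enumerate_eq_map_pyRange toks "", PySem.List.len_eq, pv_range_cast toks.length,
    List.map_map, ← List.range_eq_range']
  rfl

-- ===== VERDICT (by name: the statement is the Claim_ definition above) =====
theorem exist_table_alias_contradiction_spec : Claim_equal_exist_table_alias_contradiction := by
  intro toks _ hpre
  unfold Spec_exist_table_alias_contradiction exist_table_alias_contradiction
    exist_table_alias_contradiction_alt
  rw [pv_enum_eq, List.filter_map, List.map_map]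
  have hfilt : ((List.range' 0 toks.length).filter
      ((fun p : Int × String => p.2 == "as") ∘ (fun (n : Nat) => ((n : Int), pvTk toks n)))) =
      (List.range' 0 toks.length).filter (fun (i : Nat) => pvTk toks i == "as") := rfl
  rw [hfilt]
  exact pv_main toks hpre toks.length 0 PySem.Dict.empty (fun a => rfl)
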